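-- pv_equiv track=rewrite | github.com/ssongjj/studycodingtest | 프로그래머스/lv1/131128. 숫자 짝꿍/숫자 짝꿍.py | solution
-- ===== SOURCE A (Python) =====
-- from collections import Counter
--
-- def solution(X, Y):
--     answer = ''
--
--     x_counter = Counter(X)
--     y_counter = Counter(Y)
--
--     for i in range(9, -1, -1):
--         if str(i) in x_counter and str(i) in y_counter:
--             min_common = min(x_counter[str(i)], y_counter[str(i)])
--             answer += str(i) * min_common
--
--     if answer == "":
--         answer = "-1"
--
--     if answer[0] == "0":
--         answer = "0"
--
--     return answer
-- ===== SOURCE B (Python) =====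
-- def solution(X, Y):
--     xs = sorted((c for c in X if c.isdigit()), reverse=True)
--     ys = sorted((c for c in Y if c.isdigit()), reverse=True)
--     res = []
--     i = j = 0
--     while i < len(xs) and j < len(ys):
--         if xs[i] == ys[j]:
--             res.append(xs[i])
--             i += 1
--             j += 1
--         elif xs[i] > ys[j]:
--             i += 1
--         else:
--             j += 1
--     answer = ''.join(res)
--     if not answer:
--         return '-1'
--     if answer[0] == '0':
--         return '0'
--     return answer
-- ===== Notes on version B (the rewrite author's own statement) =====
-- stated objective: alternative
-- what changed: Replaced A's two Counter dictionaries and per-digit 9..0 loop with sorting each string's digit characters in descending order and a two-pointer merge that emits the common digits directly in descending order, keeping the same empty/leading-zero post-processing.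
import Mathlib
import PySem

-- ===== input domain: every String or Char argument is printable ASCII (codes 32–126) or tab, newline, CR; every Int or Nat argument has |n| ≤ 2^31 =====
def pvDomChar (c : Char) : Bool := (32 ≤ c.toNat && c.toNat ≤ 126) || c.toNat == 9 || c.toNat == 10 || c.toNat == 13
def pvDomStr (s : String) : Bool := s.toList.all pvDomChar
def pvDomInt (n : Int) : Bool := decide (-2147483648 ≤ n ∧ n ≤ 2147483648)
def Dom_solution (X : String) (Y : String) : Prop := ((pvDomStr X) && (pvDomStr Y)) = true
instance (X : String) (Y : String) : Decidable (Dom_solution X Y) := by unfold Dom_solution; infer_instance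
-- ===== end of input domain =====

-- B replaces A's Counter dictionaries and digit-by-digit loop by sorting both digit
-- lists descending and two-pointer merging them (objective: alternative decomposition).

-- ===== PORT A =====
-- str(i) for 0 ≤ i ≤ 9 is a single character; Counter keys are the characters of the string
def pvDigitChar (i : Int) : Char := (PySem.Int.toChars i).headD ' '

def solution (X : String) (Y : String) : String :=
  let xc := PySem.Dict.counter X.toList
  let yc := PySem.Dict.counter Y.toList
  let answer := (PySem.List.pyRange 9 (-1) (-1)).foldl (fun acc i =>
    if xc.contains (pvDigitChar i) && yc.contains (pvDigitChar i) then
      -- str(i) * min_common : min_common ≥ 1 here, so Nat replication is exact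
      acc ++ List.replicate (min (xc.getD (pvDigitChar i) 0) (yc.getD (pvDigitChar i) 0)).toNat (pvDigitChar i)
    else acc) []
  let answer := if answer = [] then ['-', '1'] else answer
  let answer := if PySem.List.pyGet? answer 0 = some '0' then ['0'] else answer
  String.ofList answer

-- ===== PORT B =====
def pvDescDigits (s : String) : List Char :=
  PySem.List.sorted (s.toList.filter (fun c => PySem.Chars.isdigit c)) (fun c => c) true

-- the two-pointer while loop, as structural recursion on the two suffixes
def pvMerge : List Char → List Char → List Char
  | [], _ => []
  | _ :: _, [] => []
  | x :: xs, y :: ys =>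
      if x = y then x :: pvMerge xs ys
      else if y < x then pvMerge xs (y :: ys)
      else pvMerge (x :: xs) ys
  termination_by a b => a.length + b.length

def solution_alt (X : String) (Y : String) : String :=
  let res := pvMerge (pvDescDigits X) (pvDescDigits Y)
  if res = [] then "-1"
  else if PySem.List.pyGet? res 0 = some '0' then "0"
  else String.ofList res

-- ===== PRECONDITION & SPEC =====
def Spec_solution (X : String) (Y : String) (out : String) : Prop := out = solution_alt X Y
instance (X : String) (Y : String) (out : String) : Decidable (Spec_solution X Y out) := by unfold Spec_solution; infer_instance

-- ===== CLAIM (what is proved, stated in full; the proofs are below) =====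
def Claim_equal_solution : Prop := ∀ (X : String) (Y : String), Dom_solution X Y → Spec_solution X Y (solution X Y)

-- ===== LEMMAS AND PROOFS =====

-- the digits A's loop visits, in A's (descending) order
def pvD : List Char := ['9', '8', '7', '6', '5', '4', '3', '2', '1', '0']

-- the common value both cores are shown to equal
def pvCanon (xs ys : List Char) : List Char :=
  pvD.flatMap (fun d => List.replicate (min (xs.count d) (ys.count d)) d)

lemma pv_isdigit_mem_D (c : Char) (h : PySem.Chars.isdigit c = true) : c ∈ pvD := by
  simp only [PySem.Chars.isdigit, Bool.and_eq_true, decide_eq_true_eq] at h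
  obtain ⟨h1, h2⟩ := h
  have hv : c = Char.ofNat c.toNat := (Char.ofNat_toNat c).symm
  have hl : 48 ≤ c.toNat := h1
  have hr : c.toNat ≤ 57 := h2
  interval_cases hc : c.toNat <;> (rw [hv]; decide)

lemma pv_sortedDesc_head_bound (y : Char) (b : List Char)
    (h : List.Pairwise (fun p q => q ≤ p) (y :: b)) : ∀ c ∈ y :: b, c ≤ y := by
  intro c hc
  rcases hc with _ | hc
  · exact le_refl _
  · exact (List.pairwise_cons.mp h).1 c (by assumption)

-- A's loop body, per digit, equals the unguarded min-count replication
lemma pv_stepA (xs ys : List Char) (d : Char) (acc : List Char) :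
    (if (PySem.Dict.counter xs).contains d && (PySem.Dict.counter ys).contains d then
        acc ++ List.replicate (min ((PySem.Dict.counter xs).getD d 0) ((PySem.Dict.counter ys).getD d 0)).toNat d
      else acc)
    = acc ++ List.replicate (min (xs.count d) (ys.count d)) d := by
  rw [PySem.Dict.getD_counter, PySem.Dict.getD_counter,
      PySem.Dict.contains_counter, PySem.Dict.contains_counter]
  by_cases hx : d ∈ xs
  · by_cases hy : d ∈ ys
    · simp only [List.contains_eq_mem, hx, hy, decide_true, Bool.and_self, if_true]
      congr 1
      rw [← Nat.cast_min, Int.toNat_natCast]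
    · have : ys.count d = 0 := List.count_eq_zero.mpr hy
      simp [List.contains_eq_mem, hy, this]
  · have : xs.count d = 0 := List.count_eq_zero.mpr hx
    simp [List.contains_eq_mem, hx, this]

-- the flatMap is insensitive to a front element absent from the other list
lemma pv_flat_drop_left (x : Char) (a b : List Char) (hxb : x ∉ b) :
    pvD.flatMap (fun d => List.replicate (min ((x :: a).count d) (b.count d)) d)
      = pvD.flatMap (fun d => List.replicate (min (a.count d) (b.count d)) d) := by
  apply List.flatMap_congr
  intro d _
  by_cases hdx : d = x
  · subst hdx
    have : b.count d = 0 := List.count_eq_zero.mpr hxb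
    simp [this]
  · simp [Ne.symm hdx]

lemma pv_flat_drop_right (y : Char) (a b : List Char) (hya : y ∉ a) :
    pvD.flatMap (fun d => List.replicate (min (a.count d) ((y :: b).count d)) d)
      = pvD.flatMap (fun d => List.replicate (min (a.count d) (b.count d)) d) := by
  apply List.flatMap_congr
  intro d _
  by_cases hdy : d = y
  · subst hdy
    have : a.count d = 0 := List.count_eq_zero.mpr hya
    simp [this]
  · simp [Ne.symm hdy]

-- pulling a common maximal front element out of the flatMap
lemma pv_flat_cons (D : List Char) (hD : List.Pairwise (fun p q => q < p) D)
    (x : Char) (hx : x ∈ D) (a b : List Char)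
    (ha : ∀ c ∈ a, c ≤ x) (hb : ∀ c ∈ b, c ≤ x) :
    D.flatMap (fun d => List.replicate (min ((x :: a).count d) ((x :: b).count d)) d)
      = x :: D.flatMap (fun d => List.replicate (min (a.count d) (b.count d)) d) := by
  induction D with
  | nil => cases hx
  | cons d D' ihD =>
    rcases List.mem_cons.mp hx with h | hx'
    · subst h
      have hlt : ∀ e ∈ D', e < x := (List.pairwise_cons.mp hD).1
      have htail : D'.flatMap (fun e => List.replicate (min ((x :: a).count e) ((x :: b).count e)) e)
          = D'.flatMap (fun e => List.replicate (min (a.count e) (b.count e)) e) := by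
        apply List.flatMap_congr
        intro e he
        have hne : e ≠ x := ne_of_lt (hlt e he)
        simp [Ne.symm hne]
      rw [List.flatMap_cons, List.flatMap_cons, htail,
          List.count_cons_self, List.count_cons_self]
      have hmin : min (a.count x + 1) (b.count x + 1) = min (a.count x) (b.count x) + 1 := by omega
      rw [hmin, List.replicate_succ, List.cons_append]
    · have hdx : x < d := (List.pairwise_cons.mp hD).1 x hx'
      have hza : (x :: a).count d = 0 := by
        refine List.count_eq_zero.mpr (fun hm => ?_)
        rcases List.mem_cons.mp hm with h | hm'
        · exact absurd (h ▸ hdx) (lt_irrefl _)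
        · exact absurd hdx (not_lt.mpr (ha d hm'))
      have hzb : (x :: b).count d = 0 := by
        refine List.count_eq_zero.mpr (fun hm => ?_)
        rcases List.mem_cons.mp hm with h | hm'
        · exact absurd (h ▸ hdx) (lt_irrefl _)
        · exact absurd hdx (not_lt.mpr (hb d hm'))
      have hza' : a.count d = 0 :=
        List.count_eq_zero.mpr (fun hm => List.count_eq_zero.mp hza (List.mem_cons_of_mem _ hm))
      have hzb' : b.count d = 0 :=
        List.count_eq_zero.mpr (fun hm => List.count_eq_zero.mp hzb (List.mem_cons_of_mem _ hm))
      rw [List.flatMap_cons, List.flatMap_cons, hza, hzb, hza', hzb']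
      simp only [Nat.min_self, List.replicate_zero, List.nil_append]
      exact ihD (List.pairwise_cons.mp hD).2 hx'

-- the merge of two descending digit lists is the descending min-count string
lemma pv_merge_eq_canon (a b : List Char)
    (ha : List.Pairwise (fun p q => q ≤ p) a) (hb : List.Pairwise (fun p q => q ≤ p) b)
    (haD : ∀ c ∈ a, c ∈ pvD) (hbD : ∀ c ∈ b, c ∈ pvD) :
    pvMerge a b = pvD.flatMap (fun d => List.replicate (min (a.count d) (b.count d)) d) := by
  generalize hn : a.length + b.length = n
  induction n using Nat.strong_induction_on generalizing a b with
  | _ n ih =>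
    match a, b with
    | [], b =>
      simp [pvMerge]
    | x :: a', [] =>
      simp [pvMerge]
    | x :: a', y :: b' =>
      by_cases hxy : x = y
      · subst hxy
        rw [pvMerge, if_pos rfl]
        have ha' := (List.pairwise_cons.mp ha).2
        have hb' := (List.pairwise_cons.mp hb).2
        rw [ih (a'.length + b'.length) (by simp at hn; omega) a' b' ha' hb'
              (fun c hc => haD c (List.mem_cons_of_mem _ hc))
              (fun c hc => hbD c (List.mem_cons_of_mem _ hc)) rfl]
        exact (pv_flat_cons pvD (by decide) x (haD x List.mem_cons_self) a' b'
          (fun c hc => (List.pairwise_cons.mp ha).1 c hc)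
          (fun c hc => (List.pairwise_cons.mp hb).1 c hc)).symm
      · by_cases hyx : y < x
        · rw [pvMerge, if_neg hxy, if_pos hyx]
          have ha' := (List.pairwise_cons.mp ha).2
          rw [ih (a'.length + (y :: b').length) (by simp at hn ⊢; omega) a' (y :: b') ha' hb
                (fun c hc => haD c (List.mem_cons_of_mem _ hc)) hbD rfl]
          refine (pv_flat_drop_left x a' (y :: b') ?_).symm
          intro hm
          exact absurd hyx (not_lt.mpr (pv_sortedDesc_head_bound y b' hb x hm))
        · rw [pvMerge, if_neg hxy, if_neg hyx]
          have hb' := (List.pairwise_cons.mp hb).2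
          rw [ih ((x :: a').length + b'.length) (by simp at hn ⊢; omega) (x :: a') b' ha hb'
                haD (fun c hc => hbD c (List.mem_cons_of_mem _ hc)) rfl]
          refine (pv_flat_drop_right y (x :: a') b' ?_).symm
          intro hm
          have hxley : x < y := lt_of_le_of_ne (not_lt.mp hyx) hxy
          exact absurd hxley (not_lt.mpr (pv_sortedDesc_head_bound x a' ha y hm))

lemma pv_coreA_eq_canon (X Y : String) :
    (PySem.List.pyRange 9 (-1) (-1)).foldl (fun acc i =>
      if (PySem.Dict.counter X.toList).contains (pvDigitChar i) && (PySem.Dict.counter Y.toList).contains (pvDigitChar i) then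
        acc ++ List.replicate (min ((PySem.Dict.counter X.toList).getD (pvDigitChar i) 0) ((PySem.Dict.counter Y.toList).getD (pvDigitChar i) 0)).toNat (pvDigitChar i)
      else acc) []
    = pvCanon X.toList Y.toList := by
  have hR : PySem.List.pyRange 9 (-1) (-1) = [9, 8, 7, 6, 5, 4, 3, 2, 1, 0] := by decide
  rw [hR]
  simp only [pv_stepA]
  rw [PySem.List.foldl_append_eq_flatMap
        (fun i => List.replicate (min (X.toList.count (pvDigitChar i)) (Y.toList.count (pvDigitChar i))) (pvDigitChar i))]
  have h9 : pvDigitChar 9 = '9' := by decide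
  have h8 : pvDigitChar 8 = '8' := by decide
  have h7 : pvDigitChar 7 = '7' := by decide
  have h6 : pvDigitChar 6 = '6' := by decide
  have h5 : pvDigitChar 5 = '5' := by decide
  have h4 : pvDigitChar 4 = '4' := by decide
  have h3 : pvDigitChar 3 = '3' := by decide
  have h2 : pvDigitChar 2 = '2' := by decide
  have h1 : pvDigitChar 1 = '1' := by decide
  have h0 : pvDigitChar 0 = '0' := by decide
  simp only [pvCanon, pvD, List.flatMap_cons, List.flatMap_nil, List.nil_append,
    h9, h8, h7, h6, h5, h4, h3, h2, h1, h0]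

lemma pv_coreB_eq_canon (X Y : String) :
    pvMerge (pvDescDigits X) (pvDescDigits Y) = pvCanon X.toList Y.toList := by
  have hsort : ∀ s : String, List.Pairwise (fun p q => q ≤ p) (pvDescDigits s) := by
    intro s
    simpa using PySem.List.sorted_pairwise_rev (s.toList.filter (fun c => PySem.Chars.isdigit c)) (fun c => c)
  have hmemD : ∀ (s : String), ∀ c ∈ pvDescDigits s, c ∈ pvD := by
    intro s c hc
    unfold pvDescDigits at hc
    rw [PySem.List.mem_sorted] at hc
    exact pv_isdigit_mem_D c (List.mem_filter.mp hc).2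
  rw [pv_merge_eq_canon _ _ (hsort X) (hsort Y) (hmemD X) (hmemD Y)]
  unfold pvCanon
  apply List.flatMap_congr
  intro d hd
  have hdig : PySem.Chars.isdigit d = true := by
    fin_cases hd <;> decide
  have hc : ∀ s : String, (pvDescDigits s).count d = s.toList.count d := by
    intro s
    unfold pvDescDigits
    rw [(PySem.List.sorted_perm _ _ _).count_eq, List.count_filter hdig]
  rw [hc X, hc Y]

-- ===== VERDICT (by name: the statement is the Claim_ definition above) =====
theorem solution_spec : Claim_equal_solution := by
  intro X Y _
  show solution X Y = solution_alt X Y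
  unfold solution solution_alt
  simp only [pv_coreA_eq_canon, pv_coreB_eq_canon]
  by_cases h : pvCanon X.toList Y.toList = []
  · simp only [h, if_true]
    decide
  · simp only [h, if_false]
    by_cases h0 : PySem.List.pyGet? (pvCanon X.toList Y.toList) 0 = some '0'
    · simp [h0]
    · simp [h0]
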